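-- pv_equiv track=rewrite | github.com/ENevelskaia/Coursework_Base_Python | main.py | photo_max_size
-- ===== SOURCE A (Python) =====
-- def photo_max_size(dict):
--     size_list = []
--     for m in dict['sizes']:
--         size_list.append(m['height']*m['width'])
--     max_value = max(size_list)
--     if max_value == 0:
--          max_index = -1
--     else:
--          max_index = size_list.index(max_value)
--     return max_value, max_index
-- ===== SOURCE B (Python) =====
-- def photo_max_size(dict):
--     sizes = dict['sizes']
--     max_value = sizes[0]['height'] * sizes[0]['width']
--     max_index = 0
--     i = 1
--     for m in sizes[1:]:
--         a = m['height'] * m['width']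
--         if a > max_value:
--             max_value = a
--             max_index = i
--         i += 1
--     if max_value == 0:
--         max_index = -1
--     return max_value, max_index
-- ===== Notes on version B (the rewrite author's own statement) =====
-- stated objective: simpler
-- what changed: Replaces A's three passes (build an area list, take max(), then list.index the max) by one pass over dict['sizes'] that keeps the running maximum area and the index of its first occurrence.
import Mathlib
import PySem

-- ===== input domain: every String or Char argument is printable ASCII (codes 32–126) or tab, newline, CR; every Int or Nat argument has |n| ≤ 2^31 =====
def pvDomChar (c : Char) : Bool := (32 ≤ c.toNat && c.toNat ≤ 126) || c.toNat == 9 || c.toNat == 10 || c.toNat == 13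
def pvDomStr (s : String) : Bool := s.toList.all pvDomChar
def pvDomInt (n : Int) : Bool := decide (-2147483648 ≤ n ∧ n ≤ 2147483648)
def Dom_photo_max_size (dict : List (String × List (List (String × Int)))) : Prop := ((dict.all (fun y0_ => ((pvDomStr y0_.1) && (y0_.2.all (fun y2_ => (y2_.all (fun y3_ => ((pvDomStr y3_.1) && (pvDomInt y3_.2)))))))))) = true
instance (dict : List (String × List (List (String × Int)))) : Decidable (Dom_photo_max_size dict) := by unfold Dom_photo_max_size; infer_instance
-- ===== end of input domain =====

-- B replaces A's three passes (area list, max(), list.index) by one pass keeping the running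
-- maximum area and the index of its first occurrence; objective: simpler (no speed claim).

-- m['height'] * m['width'] for one photo record (KeyError = none, excluded by Pre_; getD 0 is dead there)
def pvArea (m : List (String × Int)) : Int :=
  ((PySem.Dict.mk m).get? "height").getD 0 * ((PySem.Dict.mk m).get? "width").getD 0

-- ===== PORT A =====
def photo_max_size (dict : List (String × List (List (String × Int)))) : Int × Int :=
  match (PySem.Dict.mk dict).get? "sizes" with
  | none => (0, -1)          -- KeyError in Python; excluded by Pre_
  | some sizes =>
    let size_list : List Int := sizes.map pvArea
    match PySem.List.max? size_list (fun y => y) with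
    | none => (0, -1)        -- max([]) ValueError; excluded by Pre_
    | some max_value =>
      let max_index : Int :=
        if max_value = 0 then -1 else (((PySem.List.index? size_list max_value).getD 0 : Nat) : Int)
      (max_value, max_index)

-- ===== PORT B =====
def pvStep (s : Int × Int × Int) (m : List (String × Int)) : Int × Int × Int :=
  let a := pvArea m
  if s.1 < a then (a, s.2.2, s.2.2 + 1) else (s.1, s.2.1, s.2.2 + 1)

def photo_max_size_alt (dict : List (String × List (List (String × Int)))) : Int × Int :=
  match (PySem.Dict.mk dict).get? "sizes" with
  | none => (0, -1)          -- KeyError in Python; excluded by Pre_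
  | some [] => (0, -1)       -- sizes[0] IndexError; excluded by Pre_
  | some (m0 :: rest) =>
    let r := rest.foldl pvStep (pvArea m0, 0, 1)
    if r.1 = 0 then (r.1, -1) else (r.1, r.2.1)

-- ===== PRECONDITION & SPEC =====
-- Pre_ excludes exactly the inputs where the Python A raises: a missing 'sizes' key or an empty
-- sizes list (KeyError / ValueError), and any record missing 'height' or 'width' (KeyError).
def Pre_photo_max_size (dict : List (String × List (List (String × Int)))) : Prop :=
  ((PySem.Dict.mk dict).get? "sizes").getD [] ≠ [] ∧
  ∀ m ∈ ((PySem.Dict.mk dict).get? "sizes").getD [],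
    (PySem.Dict.mk m).contains "height" = true ∧ (PySem.Dict.mk m).contains "width" = true
instance (dict : List (String × List (List (String × Int)))) : Decidable (Pre_photo_max_size dict) := by unfold Pre_photo_max_size; infer_instance

def pvWitness_photo_max_size : (List (String × List (List (String × Int)))) :=
  [("sizes", [[("height", 2), ("width", 3)], [("height", 1), ("width", 7)]])]

def Spec_photo_max_size (dict : List (String × List (List (String × Int)))) (out : Int × Int) : Prop := out = photo_max_size_alt dict
instance (dict : List (String × List (List (String × Int)))) (out : Int × Int) : Decidable (Spec_photo_max_size dict out) := by unfold Spec_photo_max_size; infer_instance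

-- ===== CLAIM (what is proved, stated in full; the proofs are below) =====
def Claim_equal_photo_max_size : Prop := ∀ (dict : List (String × List (List (String × Int)))), Dom_photo_max_size dict → Pre_photo_max_size dict → Spec_photo_max_size dict (photo_max_size dict)

-- ===== LEMMAS AND PROOFS =====

-- the running maximum is the list maximum, or still the seed when nothing exceeds it
lemma foldl_max_eq_of_all_le {xs : List Int} {mv : Int} (h : ∀ x ∈ xs, x ≤ mv) :
    xs.foldl max mv = mv := by
  induction xs with
  | nil => rfl
  | cons a t ih =>
    simp only [List.foldl_cons]
    have ha : a ≤ mv := h a (by simp)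
    rw [max_eq_left ha]
    exact ih (fun x hx => h x (by simp [hx]))

lemma foldl_max_mem_of_gt {xs : List Int} {mv : Int} (h : mv < xs.foldl max mv) :
    xs.foldl max mv ∈ xs := by
  induction xs generalizing mv with
  | nil => simp at h
  | cons a t ih =>
    simp only [List.foldl_cons] at h ⊢
    by_cases hle : ∀ x ∈ t, x ≤ max mv a
    · rw [foldl_max_eq_of_all_le hle] at h ⊢
      have : max mv a = a := by omega
      simp [this]
    · push Not at hle
      obtain ⟨x, hx, hxgt⟩ := hle
      have : max mv a < t.foldl max (max mv a) := by
        have := (PySem.List.le_foldl_max t (max mv a)).2 x hx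
        omega
      exact List.mem_cons_of_mem a (ih this)

-- B's fold characterised: final max, final best index, final counter
lemma pvStep_foldl (xs : List Int) : ∀ (ms : List (List (String × Int))) (mv mi i : Int),
    ms.map pvArea = xs →
    ms.foldl pvStep (mv, mi, i) =
      (xs.foldl max mv,
       if ∀ x ∈ xs, x ≤ mv then mi
       else i + (((PySem.List.index? xs (xs.foldl max mv)).getD 0 : Nat) : Int),
       i + xs.length) := by
  induction xs with
  | nil =>
    intro ms mv mi i hms
    have : ms = [] := by cases ms <;> simp_all
    subst this; simp
  | cons a t ih =>
    intro ms mv mi i hms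
    obtain ⟨m0, rest, rfl⟩ : ∃ m0 rest, ms = m0 :: rest := by
      cases ms with
      | nil => simp at hms
      | cons m0 rest => exact ⟨m0, rest, rfl⟩
    simp only [List.map_cons, List.cons.injEq] at hms
    obtain ⟨ha, ht⟩ := hms
    simp only [List.foldl_cons]
    by_cases hlt : mv < a
    · have hstep : pvStep (mv, mi, i) m0 = (a, i, i + 1) := by
        simp [pvStep, ha, hlt]
      rw [hstep, ih rest a i (i + 1) ht]
      rw [show max mv a = a from max_eq_right (le_of_lt hlt)]
      have hcondA : ¬ (∀ x ∈ a :: t, x ≤ mv) := by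
        push Not; exact ⟨a, by simp, hlt⟩
      by_cases hc : ∀ x ∈ t, x ≤ a
      · -- max stays a, its first occurrence is position 0 of a :: t
        have hfa : t.foldl max a = a := foldl_max_eq_of_all_le hc
        rw [hfa, if_pos hc, if_neg hcondA]
        rw [PySem.List.index?_cons_self]
        refine Prod.ext rfl (Prod.ext (by simp) ?_)
        simp only [List.length_cons]
        push_cast
        ring
      · have hgt : a < t.foldl max a := by
          push Not at hc
          obtain ⟨x, hx, hxgt⟩ := hc
          have := (PySem.List.le_foldl_max t a).2 x hx
          omega
        have hne : a ≠ t.foldl max a := by omega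
        have hmem : t.foldl max a ∈ t := foldl_max_mem_of_gt hgt
        rw [if_neg hc, if_neg hcondA, PySem.List.index?_cons_of_ne t hne]
        obtain ⟨k, hk⟩ := Option.isSome_iff_exists.mp
          ((PySem.List.index?_isSome_iff t (t.foldl max a)).mpr hmem)
        rw [hk]
        refine Prod.ext rfl (Prod.ext ?_ ?_) <;> · simp; omega
    · have hstep : pvStep (mv, mi, i) m0 = (mv, mi, i + 1) := by
        simp [pvStep, ha, hlt]
      rw [hstep, ih rest mv mi (i + 1) ht]
      have hale : a ≤ mv := by omega
      rw [show max mv a = mv from max_eq_left hale]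
      by_cases hc : ∀ x ∈ t, x ≤ mv
      · have hcond : ∀ x ∈ a :: t, x ≤ mv := by
          intro x hx; rcases List.mem_cons.mp hx with rfl | hx
          · exact hale
          · exact hc x hx
        rw [if_pos hc, if_pos hcond]
        refine Prod.ext rfl (Prod.ext rfl ?_)
        simp; omega
      · have hcond : ¬ (∀ x ∈ a :: t, x ≤ mv) := by
          intro h; exact hc (fun x hx => h x (by simp [hx]))
        have hgt : mv < t.foldl max mv := by
          push Not at hc
          obtain ⟨x, hx, hxgt⟩ := hc
          have := (PySem.List.le_foldl_max t mv).2 x hx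
          omega
        have hne : a ≠ t.foldl max mv := by omega
        have hmem : t.foldl max mv ∈ t := foldl_max_mem_of_gt hgt
        rw [if_neg hc, if_neg hcond, PySem.List.index?_cons_of_ne t hne]
        obtain ⟨k, hk⟩ := Option.isSome_iff_exists.mp
          ((PySem.List.index?_isSome_iff t (t.foldl max mv)).mpr hmem)
        rw [hk]
        refine Prod.ext rfl (Prod.ext ?_ ?_) <;> · simp; omega

-- ===== VERDICT (by name: the statement is the Claim_ definition above) =====
theorem photo_max_size_spec : Claim_equal_photo_max_size := by
  intro dict _ hpre
  unfold Spec_photo_max_size photo_max_size photo_max_size_alt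
  obtain ⟨hne, _⟩ := hpre
  cases hget : (PySem.Dict.mk dict).get? "sizes" with
  | none => exact absurd hget (by simp [hget] at hne)
  | some sizes =>
    rw [hget] at hne
    simp only [Option.getD_some] at hne
    cases sizes with
    | nil => simp at hne
    | cons m0 rest =>
      simp only [List.map_cons]
      rw [PySem.List.max?_id_cons]
      rw [pvStep_foldl (rest.map pvArea) rest (pvArea m0) 0 1 rfl]
      set M := (rest.map pvArea).foldl max (pvArea m0) with hM
      by_cases hz : M = 0
      · simp [hz]
      · simp only [if_neg hz]
        by_cases hc : ∀ x ∈ rest.map pvArea, x ≤ pvArea m0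
        · -- max is the first element
          have hfa : M = pvArea m0 := foldl_max_eq_of_all_le hc
          rw [if_pos hc]
          rw [show (PySem.List.index? (pvArea m0 :: rest.map pvArea) M)
                = some 0 by rw [hfa]; exact PySem.List.index?_cons_self _ _]
          simp
        · have hgt : pvArea m0 < M := by
            push Not at hc
            obtain ⟨x, hx, hxgt⟩ := hc
            have := (PySem.List.le_foldl_max (rest.map pvArea) (pvArea m0)).2 x hx
            omega
          have hne0 : pvArea m0 ≠ M := by omega
          have hmem : M ∈ rest.map pvArea := foldl_max_mem_of_gt hgt
          rw [if_neg hc, PySem.List.index?_cons_of_ne _ hne0]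
          obtain ⟨k, hk⟩ := Option.isSome_iff_exists.mp
            ((PySem.List.index?_isSome_iff _ M).mpr hmem)
          rw [hk]
          simp only [Option.map_some, Option.getD_some]
          push_cast; ring_nf
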